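-- pv_equiv track=rewrite | github.com/GQChem/CPred | scripts/build_propensity_tables.py | extract_window_elements
-- ===== SOURCE A (Python) =====
-- def extract_window_elements(sequence: str, sites: list[int],
--                             w: int = 3) -> list[str]:
--     """Extract single AA elements from ±w windows around CP sites."""
--     elements = []
--     n = len(sequence)
--     for site in sites:
--         for offset in range(-w, w + 1):
--             pos = site + offset
--             if 0 <= pos < n:
--                 elements.append(sequence[pos])
--     return elements
-- ===== SOURCE B (Python) =====
-- def extract_window_elements(sequence: str, sites: list[int],
--                             w: int = 3) -> list[str]:
--     """Extract single AA elements from ±w windows around CP sites."""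
--     n = len(sequence)
--     elements = []
--     for site in sites:
--         lo = max(0, site - w)
--         hi = max(0, min(n, site + w + 1))
--         elements.extend(sequence[lo:hi])
--     return elements
-- ===== Notes on version B (the rewrite author's own statement) =====
-- stated objective: faster
-- what changed: Replaces the inner per-offset loop with its bounds check by clamped window arithmetic (lo = max(0, site-w), hi = max(0, min(n, site+w+1))) and one bulk slice per site.
import Mathlib
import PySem

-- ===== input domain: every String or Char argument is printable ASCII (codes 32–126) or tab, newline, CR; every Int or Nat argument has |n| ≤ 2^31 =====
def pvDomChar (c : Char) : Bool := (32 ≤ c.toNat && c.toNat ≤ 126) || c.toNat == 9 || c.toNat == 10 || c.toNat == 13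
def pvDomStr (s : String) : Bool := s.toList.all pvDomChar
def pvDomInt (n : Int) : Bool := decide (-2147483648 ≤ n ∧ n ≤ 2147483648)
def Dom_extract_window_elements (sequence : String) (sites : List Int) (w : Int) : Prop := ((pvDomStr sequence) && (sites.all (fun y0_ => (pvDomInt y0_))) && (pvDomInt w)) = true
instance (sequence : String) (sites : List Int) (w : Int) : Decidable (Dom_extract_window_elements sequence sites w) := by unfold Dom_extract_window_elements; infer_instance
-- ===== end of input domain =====

-- B replaces A's per-offset inner loop (with a bounds test on every offset) by clamped
-- window bounds (lo = max(0, site-w), hi = max(0, min(n, site+w+1))) and one bulk slice per site.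


-- ===== PORT A =====
-- for site in sites: for offset in range(-w, w+1): pos = site+offset; if 0 <= pos < n: append sequence[pos]
-- the guard 0 ≤ pos < n makes the index in range, so the '.getD ' '' default is never used
def extract_window_elements (sequence : String) (sites : List Int) (w : Int) : List String :=
  let cs := sequence.toList
  let n : Int := cs.length
  sites.foldl (fun elements site =>
    (PySem.List.pyRange (-w) (w + 1) 1).foldl (fun elements offset =>
      let pos := site + offset
      if 0 ≤ pos ∧ pos < n then elements ++ [String.ofList [cs.getD pos.toNat ' ']]
      else elements) elements) []

-- ===== PORT B =====
-- for site in sites: lo = max(0, site-w); hi = max(0, min(n, site+w+1)); elements.extend(sequence[lo:hi])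
def extract_window_elements_alt (sequence : String) (sites : List Int) (w : Int) : List String :=
  let cs := sequence.toList
  let n : Int := cs.length
  sites.foldl (fun elements site =>
    let lo := max 0 (site - w)
    let hi := max 0 (min n (site + w + 1))
    elements ++ (PySem.List.slice cs (some lo) (some hi)).map (fun c => String.ofList [c])) []

-- ===== PRECONDITION & SPEC =====
def Spec_extract_window_elements (sequence : String) (sites : List Int) (w : Int) (out : List String) : Prop := out = extract_window_elements_alt sequence sites w
instance (sequence : String) (sites : List Int) (w : Int) (out : List String) : Decidable (Spec_extract_window_elements sequence sites w out) := by unfold Spec_extract_window_elements; infer_instance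

-- ===== CLAIM (what is proved, stated in full; the proofs are below) =====
def Claim_equal_extract_window_elements : Prop := ∀ (sequence : String) (sites : List Int) (w : Int), Dom_extract_window_elements sequence sites w → Spec_extract_window_elements sequence sites w (extract_window_elements sequence sites w)

-- ===== LEMMAS AND PROOFS =====

-- one step of the clamped slice: peeling position p off the front of the window [p, q)
lemma slice_step {α : Type} (cs : List α) (d : α) (p q : Int) (hpq : p < q) :
    PySem.List.slice cs (some (max 0 p)) (some (max 0 (min (cs.length : Int) q)))
    = (if 0 ≤ p ∧ p < (cs.length : Int) then [cs.getD p.toNat d] else [])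
      ++ PySem.List.slice cs (some (max 0 (p + 1))) (some (max 0 (min (cs.length : Int) q))) := by
  have h1 : max 0 p = (((max 0 p).toNat : Nat) : Int) := by omega
  have h2 : max 0 (min (cs.length : Int) q) = (((max 0 (min (cs.length : Int) q)).toNat : Nat) : Int) := by omega
  have h3 : max 0 (p + 1) = (((max 0 (p + 1)).toNat : Nat) : Int) := by omega
  rw [h1, h2, h3, PySem.List.slice_natCast, PySem.List.slice_natCast]
  by_cases hp : 0 ≤ p ∧ p < (cs.length : Int)
  · have hlo : (max 0 p).toNat = p.toNat := by omega
    have hlo' : (max 0 (p + 1)).toNat = p.toNat + 1 := by omega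
    have hlt : p.toNat < cs.length := by omega
    have hhi : p.toNat + 1 ≤ (max 0 (min (cs.length : Int) q)).toNat := by omega
    rw [hlo, hlo', if_pos hp, List.drop_eq_getElem_cons hlt,
      show (max 0 (min (cs.length : Int) q)).toNat - p.toNat
        = ((max 0 (min (cs.length : Int) q)).toNat - (p.toNat + 1)) + 1 by omega,
      List.take_succ_cons, List.getD_eq_getElem cs d hlt, List.cons_append, List.nil_append]
  · rw [if_neg hp, List.nil_append]
    rcases lt_or_ge p 0 with hneg | hge
    · have : (max 0 p).toNat = (max 0 (p + 1)).toNat := by omega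
      rw [this]
    · have hn : (cs.length : Int) ≤ p := by omega
      have e1 : (max 0 (min (cs.length : Int) q)).toNat - (max 0 p).toNat = 0 := by omega
      have e2 : (max 0 (min (cs.length : Int) q)).toNat - (max 0 (p + 1)).toNat = 0 := by omega
      rw [e1, e2, List.take_zero, List.take_zero]

-- A's inner loop over offsets a..b-1 equals appending the clamped slice of positions site+a..site+b-1
lemma inner_loop_eq_slice (cs : List Char) (site : Int) (a b : Int) (acc : List String) :
    (PySem.List.pyRange a b 1).foldl (fun elements offset =>
        let pos := site + offset
        if 0 ≤ pos ∧ pos < (cs.length : Int) then elements ++ [String.ofList [cs.getD pos.toNat ' ']]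
        else elements) acc
    = acc ++ (PySem.List.slice cs (some (max 0 (site + a)))
        (some (max 0 (min (cs.length : Int) (site + b))))).map (fun c => String.ofList [c]) := by
  suffices H : ∀ (k : Nat) (a : Int) (acc : List String), (b - a).toNat = k →
      (PySem.List.pyRange a b 1).foldl (fun elements offset =>
        let pos := site + offset
        if 0 ≤ pos ∧ pos < (cs.length : Int) then elements ++ [String.ofList [cs.getD pos.toNat ' ']]
        else elements) acc
      = acc ++ (PySem.List.slice cs (some (max 0 (site + a)))
          (some (max 0 (min (cs.length : Int) (site + b))))).map (fun c => String.ofList [c]) by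
    exact H (b - a).toNat a acc rfl
  intro k
  induction k with
  | zero =>
      intro a acc h0
      rw [PySem.List.pyRange_one_eq_nil (by omega), List.foldl_nil]
      have h1 : max 0 (site + a) = (((max 0 (site + a)).toNat : Nat) : Int) := by omega
      have h2 : max 0 (min (cs.length : Int) (site + b))
          = (((max 0 (min (cs.length : Int) (site + b))).toNat : Nat) : Int) := by omega
      rw [h1, h2, PySem.List.slice_natCast,
        show (max 0 (min (cs.length : Int) (site + b))).toNat - (max 0 (site + a)).toNat = 0 by omega,
        List.take_zero, List.map_nil, List.append_nil]
  | succ k ih =>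
      intro a acc h0
      rw [PySem.List.pyRange_one_cons (by omega : a < b), List.foldl_cons,
        ih (a + 1) _ (by omega),
        slice_step cs ' ' (site + a) (site + b) (by omega),
        show site + (a + 1) = site + a + 1 by ring]
      simp only [List.map_append]
      by_cases hp : 0 ≤ site + a ∧ site + a < (cs.length : Int)
      · rw [if_pos hp, if_pos hp]
        simp [List.append_assoc]
      · rw [if_neg hp, if_neg hp]
        simp

-- the two outer folds agree from any accumulator
lemma outer_fold_congr (cs : List Char) (w : Int) (sites : List Int) (acc : List String) :
    sites.foldl (fun elements site =>
      (PySem.List.pyRange (-w) (w + 1) 1).foldl (fun elements offset =>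
        let pos := site + offset
        if 0 ≤ pos ∧ pos < (cs.length : Int) then elements ++ [String.ofList [cs.getD pos.toNat ' ']]
        else elements) elements) acc
    = sites.foldl (fun elements site =>
      elements ++ (PySem.List.slice cs (some (max 0 (site - w)))
        (some (max 0 (min (cs.length : Int) (site + w + 1))))).map (fun c => String.ofList [c])) acc := by
  have hf : (fun (elements : List String) (site : Int) =>
      (PySem.List.pyRange (-w) (w + 1) 1).foldl (fun elements offset =>
        let pos := site + offset
        if 0 ≤ pos ∧ pos < (cs.length : Int) then elements ++ [String.ofList [cs.getD pos.toNat ' ']]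
        else elements) elements)
      = (fun (elements : List String) (site : Int) =>
      elements ++ (PySem.List.slice cs (some (max 0 (site - w)))
        (some (max 0 (min (cs.length : Int) (site + w + 1))))).map (fun c => String.ofList [c])) := by
    funext elements site
    rw [inner_loop_eq_slice, show site + -w = site - w by ring,
      show site + (w + 1) = site + w + 1 by ring]
  rw [hf]

-- ===== VERDICT (by name: the statement is the Claim_ definition above) =====
theorem extract_window_elements_spec : Claim_equal_extract_window_elements := by
  intro sequence sites w _
  unfold Spec_extract_window_elements extract_window_elements extract_window_elements_alt
  exact outer_fold_congr sequence.toList w sites []
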